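-- pv_equiv track=rewrite | github.com/arjunreddy20/prog | python_main/max_consicutive_in_array.py | count_max_consecutive_repeats
-- ===== SOURCE A (Python) =====
-- def count_max_consecutive_repeats(nums):
--     if not nums:
--         return 0
--
--     max_count = 1
--     current_count = 1
--
--     for i in range(1, len(nums)):
--         if nums[i] == nums[i - 1]:
--             current_count += 1
--         else:
--             if current_count > max_count:
--                 max_count = current_count
--             current_count = 1
--
--     # Check the last sequence
--     if current_count > max_count:
--         max_count = current_count
--
--     return max_count
-- ===== SOURCE B (Python) =====
-- def count_max_consecutive_repeats(nums):
--     runs = []  # list of (value, run_length) for the maximal runs of equal adjacent values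
--     for x in nums:
--         if runs and runs[-1][0] == x:
--             v, c = runs[-1]
--             runs[-1] = (v, c + 1)
--         else:
--             runs.append((x, 1))
--     return max((c for _, c in runs), default=0)
-- ===== Notes on version B (the rewrite author's own statement) =====
-- stated objective: alternative
-- what changed: B decomposes the task group-then-reduce: one pass builds the explicit list of (value, run-length) groups, then the answer is the max of the run lengths with default 0, instead of A's interleaved current_count/max_count tracking over index pairs with a final fix-up.
import Mathlib
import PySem

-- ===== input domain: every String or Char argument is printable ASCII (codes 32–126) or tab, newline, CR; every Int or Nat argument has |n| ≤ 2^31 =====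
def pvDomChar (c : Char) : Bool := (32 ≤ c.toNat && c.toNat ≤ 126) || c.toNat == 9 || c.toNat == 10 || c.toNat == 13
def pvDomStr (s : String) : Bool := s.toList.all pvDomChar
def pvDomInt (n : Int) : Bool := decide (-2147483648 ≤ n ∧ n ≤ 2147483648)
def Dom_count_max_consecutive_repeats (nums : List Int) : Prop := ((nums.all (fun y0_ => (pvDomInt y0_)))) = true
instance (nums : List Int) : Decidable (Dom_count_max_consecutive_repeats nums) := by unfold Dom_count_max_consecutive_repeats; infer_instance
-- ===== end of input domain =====

-- B replaces A's interleaved current/max counter with a group-then-reduce pass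
-- (build the (value, run-length) groups, then take the max run length); alternative, same cost.


-- ===== PORT A =====
-- loop body of A's `for i in range(1, len(nums))` (state = (max_count, current_count))
def pvStepA (nums : List Int) (p : Int × Int) (i : Int) : Int × Int :=
  if PySem.List.pyGetD nums i 0 = PySem.List.pyGetD nums (i - 1) 0 then
    (p.1, p.2 + 1)
  else
    ((if p.2 > p.1 then p.2 else p.1), 1)

def count_max_consecutive_repeats (nums : List Int) : Int :=
  if nums = [] then 0
  else
    let st := (PySem.List.pyRange 1 (nums.length : Int)).foldl (pvStepA nums) (1, 1)
    if st.2 > st.1 then st.2 else st.1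

-- ===== PORT B =====
-- one iteration of B's run-building loop: extend the last run or open a new one
def pvRunStep (runs : List (Int × Int)) (x : Int) : List (Int × Int) :=
  match runs.getLast? with
  | some (v, c) => if v = x then runs.dropLast ++ [(v, c + 1)] else runs ++ [(x, 1)]
  | none => runs ++ [(x, 1)]

def count_max_consecutive_repeats_alt (nums : List Int) : Int :=
  PySem.List.maxD ((nums.foldl pvRunStep []).map Prod.snd) id 0

-- ===== PRECONDITION & SPEC =====
def Spec_count_max_consecutive_repeats (nums : List Int) (out : Int) : Prop := out = count_max_consecutive_repeats_alt nums
instance (nums : List Int) (out : Int) : Decidable (Spec_count_max_consecutive_repeats nums out) := by unfold Spec_count_max_consecutive_repeats; infer_instance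

-- ===== CLAIM (what is proved, stated in full; the proofs are below) =====
def Claim_equal_count_max_consecutive_repeats : Prop := ∀ (nums : List Int), Dom_count_max_consecutive_repeats nums → Spec_count_max_consecutive_repeats nums (count_max_consecutive_repeats nums)

-- ===== LEMMAS AND PROOFS =====

-- canonical run list of a `prev`-run of current length `c` followed by `rest`
def gruns : Int → Int → List Int → List (Int × Int)
  | prev, c, [] => [(prev, c)]
  | prev, c, y :: ys => if y = prev then gruns prev (c + 1) ys else (prev, c) :: gruns y 1 ys

-- A's loop as structural recursion on the remaining elements
def pairA : Int × Int → Int → List Int → Int × Int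
  | p, _, [] => p
  | p, prev, y :: ys =>
      if y = prev then pairA (p.1, p.2 + 1) y ys
      else pairA ((if p.2 > p.1 then p.2 else p.1), 1) y ys

-- A's final fix-up
def pvFinal (p : Int × Int) : Int := if p.2 > p.1 then p.2 else p.1

-- running max starting from c
def m1 (c : Int) (l : List Int) : Int := l.foldl (fun m x => if m < x then x else m) c

theorem gruns_cons (prev c y : Int) (ys : List Int) :
    gruns prev c (y :: ys) = if y = prev then gruns prev (c + 1) ys else (prev, c) :: gruns y 1 ys := rfl

theorem pairA_cons (p : Int × Int) (prev y : Int) (ys : List Int) :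
    pairA p prev (y :: ys)
      = if y = prev then pairA (p.1, p.2 + 1) y ys
        else pairA ((if p.2 > p.1 then p.2 else p.1), 1) y ys := rfl

theorem lemA (nums : List Int) (n : Nat) : ∀ (k : Nat) (p : Int × Int),
    nums.length - (k + 1) = n → (hk : k < nums.length) →
    (PySem.List.pyRange ((k : Int) + 1) (nums.length : Int)).foldl (pvStepA nums) p
      = pairA p nums[k] (nums.drop (k + 1)) := by
  induction n with
  | zero =>
      intro k p hn hk
      rw [PySem.List.pyRange_one_eq_nil (by omega), List.drop_eq_nil_of_le (by omega)]
      simp [pairA]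
  | succ n ih =>
      intro k p hn hk
      have hk1 : k + 1 < nums.length := by omega
      rw [PySem.List.pyRange_one_cons (by exact_mod_cast (by omega : (k : Int) + 1 < nums.length)),
          List.foldl_cons]
      have hget1 : PySem.List.pyGetD nums ((k : Int) + 1) 0 = nums[k + 1] := by
        have := PySem.List.pyGetD_natCast nums (k + 1) 0
        push_cast at this
        rw [this, List.getD_eq_getElem _ _ hk1]
      have hget0 : PySem.List.pyGetD nums ((k : Int) + 1 - 1) 0 = nums[k] := by
        have h0 : ((k : Int) + 1 - 1) = ((k : Nat) : Int) := by ring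
        rw [h0, PySem.List.pyGetD_natCast nums k 0, List.getD_eq_getElem _ _ hk]
      have hstep : pvStepA nums p ((k : Int) + 1)
          = if nums[k + 1] = nums[k] then (p.1, p.2 + 1)
            else ((if p.2 > p.1 then p.2 else p.1), 1) := by
        unfold pvStepA; rw [hget1, hget0]
      rw [hstep, List.drop_eq_getElem_cons hk1, pairA_cons]
      have harr : ((k : Int) + 1 + 1) = ((k + 1 : Nat) : Int) + 1 := by push_cast; ring
      rw [harr]
      by_cases h : nums[k + 1] = nums[k]
      · rw [if_pos h, if_pos h]
        exact ih (k + 1) _ (by omega) hk1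
      · rw [if_neg h, if_neg h]
        exact ih (k + 1) _ (by omega) hk1

theorem lemB : ∀ (rest : List Int) (pre : List (Int × Int)) (prev c : Int),
    rest.foldl pvRunStep (pre ++ [(prev, c)]) = pre ++ gruns prev c rest := by
  intro rest
  induction rest with
  | nil => intro pre prev c; simp [gruns]
  | cons y ys ih =>
      intro pre prev c
      rw [List.foldl_cons]
      have hl : (pre ++ [(prev, c)]).getLast? = some (prev, c) := List.getLast?_concat
      by_cases h : prev = y
      · have hstep : pvRunStep (pre ++ [(prev, c)]) y = pre ++ [(prev, c + 1)] := by
          unfold pvRunStep; rw [hl]; simp [h]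
        rw [hstep, ih pre prev (c + 1), gruns_cons, if_pos h.symm]
      · have hstep : pvRunStep (pre ++ [(prev, c)]) y = (pre ++ [(prev, c)]) ++ [(y, 1)] := by
          unfold pvRunStep; rw [hl]; simp [h]
        rw [hstep, ih (pre ++ [(prev, c)]) y 1, gruns_cons,
            if_neg (fun hyp => h hyp.symm)]
        simp

theorem lemC : ∀ (rest : List Int) (prev b c : Int),
    pvFinal (pairA (b, c) prev rest) = m1 b ((gruns prev c rest).map Prod.snd) := by
  intro rest
  induction rest with
  | nil =>
      intro prev b c
      simp only [pairA, gruns, List.map_cons, List.map_nil, m1, List.foldl, pvFinal]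
  | cons y ys ih =>
      intro prev b c
      rw [pairA_cons, gruns_cons]
      by_cases h : y = prev
      · subst h
        rw [if_pos rfl, if_pos rfl]
        exact ih y b (c + 1)
      · rw [if_neg h, if_neg h]
        rw [ih y (if c > b then c else b) 1]
        simp only [List.map_cons]
        have hm : m1 b (c :: (gruns y 1 ys).map Prod.snd)
            = m1 (if b < c then c else b) ((gruns y 1 ys).map Prod.snd) := rfl
        rw [hm]

theorem max?_some (l : List Int) : ∀ m : Int,
    PySem.List.max? (α := Int) (m :: l) id = some (m1 m l) := by
  induction l with
  | nil => intro m; simp [PySem.List.max?, m1]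
  | cons x xs ih =>
      intro m
      by_cases hx : m < x
      · have h1 : PySem.List.max? (α := Int) (m :: x :: xs) id
            = PySem.List.max? (α := Int) (x :: xs) id := by
          simp [PySem.List.max?, List.foldl, hx]
        rw [h1, ih x]
        simp [m1, List.foldl, hx]
      · have h1 : PySem.List.max? (α := Int) (m :: x :: xs) id
            = PySem.List.max? (α := Int) (m :: xs) id := by
          simp [PySem.List.max?, List.foldl, hx]
        rw [h1, ih m]
        simp [m1, List.foldl, hx]

theorem grunsHead : ∀ (rest : List Int) (prev c : Int),
    ∃ c0 tl, (gruns prev c rest).map Prod.snd = c0 :: tl ∧ c ≤ c0 := by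
  intro rest
  induction rest with
  | nil => intro prev c; exact ⟨c, [], by simp [gruns], le_refl c⟩
  | cons y ys ih =>
      intro prev c
      rw [gruns_cons]
      by_cases h : y = prev
      · obtain ⟨c0, tl, heq, hle⟩ := ih prev (c + 1)
        exact ⟨c0, tl, by rw [if_pos h]; exact heq, by omega⟩
      · exact ⟨c, (gruns y 1 ys).map Prod.snd, by rw [if_neg h]; simp, le_refl c⟩

-- ===== VERDICT (by name: the statement is the Claim_ definition above) =====
theorem count_max_consecutive_repeats_spec : Claim_equal_count_max_consecutive_repeats := by
  intro nums _
  unfold Spec_count_max_consecutive_repeats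
  match nums with
  | [] => rfl
  | x :: xs =>
      unfold count_max_consecutive_repeats count_max_consecutive_repeats_alt
      rw [if_neg (by simp)]
      have h0 : (0 : Nat) < (x :: xs).length := by simp
      have hA := lemA (x :: xs) ((x :: xs).length - 1) 0 (1, 1) rfl h0
      simp only [Nat.cast_zero, zero_add] at hA
      show pvFinal ((PySem.List.pyRange 1 ((x :: xs).length : Int)).foldl (pvStepA (x :: xs)) (1, 1)) = _
      rw [hA]
      have hfold : (x :: xs).foldl pvRunStep [] = gruns x 1 xs := by
        rw [List.foldl_cons]
        have hstep : pvRunStep [] x = [] ++ [(x, 1)] := by simp [pvRunStep]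
        rw [hstep, lemB xs [] x 1, List.nil_append]
      rw [hfold]
      have hdrop : (x :: xs).drop 1 = xs := rfl
      have hget : (x :: xs)[0] = x := rfl
      rw [hdrop, hget, lemC xs x 1 1]
      obtain ⟨c0, tl, heq, hle⟩ := grunsHead xs x 1
      rw [heq]
      unfold PySem.List.maxD
      rw [max?_some tl c0]
      simp only [Option.getD_some]
      have hm : m1 1 (c0 :: tl) = m1 (if (1:Int) < c0 then c0 else 1) tl := rfl
      rw [hm]
      congr 1
      split_ifs <;> omega
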